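-- pv_equiv track=rewrite | github.com/MOKIMOKI0312/bachlor-thesis | AI-Data-Center-Analysis_migration_bundle_20260311/tools/fix_ems_e01.py | fix_p1
-- ===== SOURCE A (Python) =====
-- def fix_p1(lines: list) -> list:
--     """Fix 2 + Fix 3: 删除紧急保护块 + CT_Pump 上限 5000→3300"""
--     new_lines = []
--     inside_if = False
--
--     for item in lines:
--         line = item['program_line']
--
--         # Fix 3: CT_Pump 上限
--         if '5000' in line and 'CT_Pump_Now' in line:
--             item = {'program_line': line.replace('5000', '3300')}
--
--         # Fix 2: 删除 IF Zone_Air_Now > 30 ... ENDIF 块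
--         if line.strip().startswith('IF Zone_Air_Now'):
--             inside_if = True
--             continue
--         if inside_if:
--             if line.strip() == 'ENDIF':
--                 inside_if = False
--             continue
--
--         new_lines.append(item)
--
--     return new_lines
-- ===== SOURCE B (Python) =====
-- def fix_p1(lines: list) -> list:
--     """Index-based scan: on an 'IF Zone_Air_Now' line an inner loop consumes the
--     whole block up to and including the next line whose strip() == 'ENDIF'."""
--     out = []
--     i = 0
--     n = len(lines)
--     while i < n:
--         line = lines[i]['program_line']
--         if line.strip().startswith('IF Zone_Air_Now'):
--             i += 1
--             while i < n:
--                 ended = lines[i]['program_line'].strip() == 'ENDIF'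
--                 i += 1
--                 if ended:
--                     break
--             continue
--         if '5000' in line and 'CT_Pump_Now' in line:
--             out.append({'program_line': line.replace('5000', '3300')})
--         else:
--             out.append(lines[i])
--         i += 1
--     return out
-- ===== Notes on version B (the rewrite author's own statement) =====
-- stated objective: alternative
-- what changed: Replaces the reentrant inside_if flag threaded through one foldl-style pass by an index-based scan in which an inner loop consumes an entire IF-block (up to and including its ENDIF line) at once, so no state crosses iterations.
import Mathlib
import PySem

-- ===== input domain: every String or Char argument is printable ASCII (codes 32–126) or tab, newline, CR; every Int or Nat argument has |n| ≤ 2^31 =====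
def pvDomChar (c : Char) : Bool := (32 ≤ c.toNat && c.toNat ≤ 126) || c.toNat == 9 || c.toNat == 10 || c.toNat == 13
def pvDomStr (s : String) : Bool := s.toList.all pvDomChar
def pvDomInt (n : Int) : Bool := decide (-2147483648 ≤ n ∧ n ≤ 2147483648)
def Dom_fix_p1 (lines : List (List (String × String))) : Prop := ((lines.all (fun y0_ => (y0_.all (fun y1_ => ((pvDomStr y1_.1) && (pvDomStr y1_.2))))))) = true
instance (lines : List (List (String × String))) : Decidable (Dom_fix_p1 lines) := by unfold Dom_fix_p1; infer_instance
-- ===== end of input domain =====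

-- B replaces A's reentrant inside_if flag by an index scan whose inner loop drops a whole
-- IF-block at once (objective: alternative decomposition; same O(n) cost).

-- shared accessor: item['program_line'] (under Pre_ the key is present and unique,
-- so first-match lookup equals Python's dict lookup; the getD "" default is never hit inside Pre_)
def getPL (item : List (String × String)) : String :=
  (((item.find? (fun p => p.1 == "program_line")).map (·.2)).getD "")

-- ===== PORT A =====
def fix_p1 (lines : List (List (String × String))) : List (List (String × String)) :=
  (lines.foldl
    (fun (st : List (List (String × String)) × Bool) item =>
      let line := getPL item
      let item' := if PySem.Str.isIn "5000" line && PySem.Str.isIn "CT_Pump_Now" line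
                   then [("program_line", PySem.Str.replace line "5000" "3300")] else item
      if PySem.Str.startswith (PySem.Str.strip line) "IF Zone_Air_Now" then (st.1, true)
      else if st.2 then
        (if PySem.Str.strip line == "ENDIF" then (st.1, false) else (st.1, true))
      else (st.1 ++ [item'], st.2))
    ([], false)).1

-- ===== PORT B =====
mutual
def fixGo : List (List (String × String)) → List (List (String × String))
  | [] => []
  | item :: rest =>
    let line := getPL item
    if PySem.Str.startswith (PySem.Str.strip line) "IF Zone_Air_Now" then fixSkip rest
    else if PySem.Str.isIn "5000" line && PySem.Str.isIn "CT_Pump_Now" line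
      then [("program_line", PySem.Str.replace line "5000" "3300")] :: fixGo rest
      else item :: fixGo rest
def fixSkip : List (List (String × String)) → List (List (String × String))
  | [] => []
  | item :: rest =>
    if PySem.Str.strip (getPL item) == "ENDIF" then fixGo rest else fixSkip rest
end

def fix_p1_alt (lines : List (List (String × String))) : List (List (String × String)) :=
  fixGo lines

-- ===== PRECONDITION & SPEC =====
-- Pre_ excludes items missing the 'program_line' key (Python A raises KeyError there) and
-- items with duplicate keys, where the assoc-list encoding of a Python dict is ambiguous.
def Pre_fix_p1 (lines : List (List (String × String))) : Prop :=
  ∀ item ∈ lines, (item.map (·.1)).Nodup ∧ "program_line" ∈ item.map (·.1)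
instance (lines : List (List (String × String))) : Decidable (Pre_fix_p1 lines) := by
  unfold Pre_fix_p1; infer_instance

def pvWitness_fix_p1 : (List (List (String × String))) :=
  [[("program_line", "SET CT_Pump_Now = 5000")], [("program_line", "IF Zone_Air_Now > 30")],
   [("program_line", "ENDIF")], [("program_line", "y")]]

def Spec_fix_p1 (lines : List (List (String × String))) (out : List (List (String × String))) : Prop := out = fix_p1_alt lines
instance (lines : List (List (String × String))) (out : List (List (String × String))) : Decidable (Spec_fix_p1 lines out) := by unfold Spec_fix_p1; infer_instance

-- ===== CLAIM (what is proved, stated in full; the proofs are below) =====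
def Claim_equal_fix_p1 : Prop := ∀ (lines : List (List (String × String))), Dom_fix_p1 lines → Pre_fix_p1 lines → Spec_fix_p1 lines (fix_p1 lines)

-- ===== LEMMAS AND PROOFS =====

-- an 'IF Zone_Air_Now' prefix rules the stripped line out as 'ENDIF'
theorem strip_if_ne_endif (s : String)
    (h : PySem.Str.startswith (PySem.Str.strip s) "IF Zone_Air_Now" = true) :
    (PySem.Str.strip s == "ENDIF") = false := by
  by_contra hne
  have he : PySem.Str.strip s = "ENDIF" := by
    cases hb : (PySem.Str.strip s == "ENDIF") with
    | false => exact absurd hb hne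
    | true => exact of_decide_eq_true hb
  rw [he] at h
  exact absurd h (by decide)

-- loop invariant: A's fold from (acc, false) produces acc ++ fixGo, and from (acc, true) acc ++ fixSkip
theorem fold_inv (lines : List (List (String × String)))
    (acc : List (List (String × String))) :
    ((lines.foldl
      (fun (st : List (List (String × String)) × Bool) item =>
        let line := getPL item
        let item' := if PySem.Str.isIn "5000" line && PySem.Str.isIn "CT_Pump_Now" line
                     then [("program_line", PySem.Str.replace line "5000" "3300")] else item
        if PySem.Str.startswith (PySem.Str.strip line) "IF Zone_Air_Now" then (st.1, true)
        else if st.2 then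
          (if PySem.Str.strip line == "ENDIF" then (st.1, false) else (st.1, true))
        else (st.1 ++ [item'], st.2))
      (acc, false)).1 = acc ++ fixGo lines)
    ∧ ((lines.foldl
      (fun (st : List (List (String × String)) × Bool) item =>
        let line := getPL item
        let item' := if PySem.Str.isIn "5000" line && PySem.Str.isIn "CT_Pump_Now" line
                     then [("program_line", PySem.Str.replace line "5000" "3300")] else item
        if PySem.Str.startswith (PySem.Str.strip line) "IF Zone_Air_Now" then (st.1, true)
        else if st.2 then
          (if PySem.Str.strip line == "ENDIF" then (st.1, false) else (st.1, true))
        else (st.1 ++ [item'], st.2))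
      (acc, true)).1 = acc ++ fixSkip lines) := by
  induction lines generalizing acc with
  | nil => simp [fixGo, fixSkip]
  | cons item rest ih =>
    constructor
    · simp only [List.foldl_cons, fixGo]
      by_cases hif : PySem.Str.startswith (PySem.Str.strip (getPL item)) "IF Zone_Air_Now" = true
      · simp only [hif, if_true]
        exact (ih acc).2
      · simp only [hif, if_false, Bool.false_eq_true]
        by_cases hr : (PySem.Str.isIn "5000" (getPL item) && PySem.Str.isIn "CT_Pump_Now" (getPL item)) = true
        · simp only [hr, if_true]
          rw [(ih (acc ++ [[("program_line", PySem.Str.replace (getPL item) "5000" "3300")]])).1]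
          simp
        · simp only [hr, if_false, Bool.false_eq_true]
          rw [(ih (acc ++ [item])).1]
          simp
    · simp only [List.foldl_cons, fixSkip]
      by_cases hif : PySem.Str.startswith (PySem.Str.strip (getPL item)) "IF Zone_Air_Now" = true
      · simp only [hif, if_true, strip_if_ne_endif _ hif, Bool.false_eq_true, if_false]
        exact (ih acc).2
      · simp only [hif, if_false, Bool.false_eq_true]
        by_cases he : (PySem.Str.strip (getPL item) == "ENDIF") = true
        · simp only [he, if_true]
          exact (ih acc).1
        · simp only [he, if_false, Bool.false_eq_true]
          exact (ih acc).2

-- ===== VERDICT (by name: the statement is the Claim_ definition above) =====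
theorem fix_p1_spec : Claim_equal_fix_p1 := by
  intro lines _ _
  unfold Spec_fix_p1 fix_p1 fix_p1_alt
  simpa using (fold_inv lines []).1
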